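-- pv_equiv track=rewrite | github.com/z1lc/zdone | app/card_generation/highlight_clozer.py | get_suffix_punc
-- ===== SOURCE A (Python) =====
-- import string
--
-- def get_suffix_punc(word: str) -> str:
--     last_non_punc_idx = len(word) - 1
--     while last_non_punc_idx >= 0 and word[last_non_punc_idx] in string.punctuation:
--         last_non_punc_idx -= 1
--     # check for apostrophes in possessive/plurals prior to other punctuation
--     # e.g. catch things like "The house is LeBron's."
--     trimmed_ending_punctuation_word = word[: last_non_punc_idx + 1]
--     if trimmed_ending_punctuation_word.endswith("'s"):
--         last_non_punc_idx -= 2  # trim 's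
--     return word[last_non_punc_idx + 1 :]
-- ===== SOURCE B (Python) =====
-- import string
-- from itertools import takewhile
--
-- def get_suffix_punc(word: str) -> str:
--     rev = word[::-1]
--     punc = ''.join(takewhile(lambda c: c in string.punctuation, rev))
--     rest = rev[len(punc):]
--     if rest.startswith("s'"):
--         punc += "s'"
--     return punc[::-1]
-- ===== Notes on version B (the rewrite author's own statement) =====
-- stated objective: simpler
-- what changed: Replaces A's explicit index-decrementing while-loop over the string and its separate possessive index re-adjustment with a takeWhile over the reversed string plus a startswith check, maintaining no index arithmetic.
import Mathlib
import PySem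

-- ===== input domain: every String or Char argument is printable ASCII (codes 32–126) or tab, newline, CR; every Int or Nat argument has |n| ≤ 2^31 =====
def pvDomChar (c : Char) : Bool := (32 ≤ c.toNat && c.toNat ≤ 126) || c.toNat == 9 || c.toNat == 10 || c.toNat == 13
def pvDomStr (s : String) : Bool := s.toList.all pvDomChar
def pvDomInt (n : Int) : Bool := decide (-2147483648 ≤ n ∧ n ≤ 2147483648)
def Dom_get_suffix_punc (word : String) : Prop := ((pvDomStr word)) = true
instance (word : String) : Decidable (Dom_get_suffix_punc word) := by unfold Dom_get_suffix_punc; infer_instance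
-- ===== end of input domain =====

-- B replaces A's explicit index-decrementing scan loop (plus separate possessive index
-- re-adjustment) by a takeWhile over the reversed string; objective: simpler, same cost.

-- ===== PORT A =====
-- string.punctuation
def pvPunc : List Char :=
  ['!', '"', '#', '$', '%', '&', '\'', '(', ')', '*', '+', ',', '-', '.', '/',
   ':', ';', '<', '=', '>', '?', '@', '[', '\\', ']', '^', '_', '`', '{', '|', '}', '~']

def pvIsPunc (c : Char) : Bool := pvPunc.contains c

-- the while loop of A, decrementing last_non_punc_idx; the fuel argument only makes it total
-- (the loop runs at most len(word) times, so fuel = cs.length never runs out)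
def pvLoopA (cs : List Char) : Nat → Int → Int
  | 0, i => i
  | fuel + 1, i =>
    if (decide (0 ≤ i) && (PySem.List.pyGet? cs i).any pvIsPunc) then
      pvLoopA cs fuel (i - 1)
    else i

def get_suffix_punc (word : String) : String :=
  let cs := word.toList
  let last := pvLoopA cs cs.length ((cs.length : Int) - 1)
  let trimmed := PySem.List.slice cs none (some (last + 1))
  let last2 := if PySem.Chars.endswith trimmed ['\'', 's'] then last - 2 else last
  String.mk (PySem.List.slice cs (some (last2 + 1)) none)

-- ===== PORT B =====
def get_suffix_punc_alt (word : String) : String :=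
  let rev := word.toList.reverse          -- word[::-1]
  let punc := rev.takeWhile pvIsPunc      -- ''.join(takewhile(... in string.punctuation, rev))
  let rest := rev.drop punc.length
  let punc2 := if PySem.Chars.startswith rest ['s', '\''] then punc ++ ['s', '\''] else punc
  String.mk punc2.reverse

-- ===== PRECONDITION & SPEC =====
def Spec_get_suffix_punc (word : String) (out : String) : Prop := out = get_suffix_punc_alt word
instance (word : String) (out : String) : Decidable (Spec_get_suffix_punc word out) := by unfold Spec_get_suffix_punc; infer_instance

-- ===== CLAIM (what is proved, stated in full; the proofs are below) =====
def Claim_equal_get_suffix_punc : Prop := ∀ (word : String), Dom_get_suffix_punc word → Spec_get_suffix_punc word (get_suffix_punc word)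

-- ===== LEMMAS AND PROOFS =====

lemma pvStep (cs : List Char) (f : Nat) (i : Int) :
    pvLoopA cs (f + 1) i
      = if (decide (0 ≤ i) && (PySem.List.pyGet? cs i).any pvIsPunc) then
          pvLoopA cs f (i - 1)
        else i := rfl

-- the loop only inspects indices ≤ its argument, so an element appended beyond them is invisible
lemma pvLoopA_append (ys : List Char) (a : Char) (fuel : Nat) : ∀ i : Int,
    i < (ys.length : Int) → pvLoopA (ys ++ [a]) fuel i = pvLoopA ys fuel i := by
  induction fuel with
  | zero => intro i _; rfl
  | succ f ih =>
    intro i h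
    by_cases h0 : 0 ≤ i
    · obtain ⟨m, rfl⟩ : ∃ m : Nat, i = (m : Int) := ⟨i.toNat, by omega⟩
      have hm : m < ys.length := by exact_mod_cast h
      have hget : PySem.List.pyGet? (ys ++ [a]) (m : Int) = PySem.List.pyGet? ys (m : Int) := by
        rw [PySem.List.pyGet?_natCast, PySem.List.pyGet?_natCast, List.getElem?_append_left hm]
      rw [pvStep, pvStep, hget]
      cases hp : ((PySem.List.pyGet? ys (m : Int)).any pvIsPunc) with
      | true =>
        rw [if_pos (by rw [Bool.and_true]; exact decide_eq_true h0),
            if_pos (by rw [Bool.and_true]; exact decide_eq_true h0)]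
        exact ih _ (by omega)
      | false =>
        rw [if_neg (by rw [Bool.and_false]; exact Bool.false_ne_true),
            if_neg (by rw [Bool.and_false]; exact Bool.false_ne_true)]
    · have hd : decide (0 ≤ i) = false := decide_eq_false h0
      rw [pvStep, pvStep, if_neg (by rw [hd, Bool.false_and]; exact Bool.false_ne_true),
          if_neg (by rw [hd, Bool.false_and]; exact Bool.false_ne_true)]

-- A's scan ends exactly below the trailing-punctuation run, i.e. takeWhile on the reverse
lemma pvLoopA_main (cs : List Char) : ∀ fuel : Nat, cs.length ≤ fuel →
    pvLoopA cs fuel ((cs.length : Int) - 1)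
      = (cs.length : Int) - 1 - ((cs.reverse.takeWhile pvIsPunc).length : Int) := by
  induction cs using List.reverseRecOn with
  | nil =>
    intro fuel _
    cases fuel with
    | zero => rfl
    | succ f =>
      simp only [List.length_nil, Nat.cast_zero, zero_sub]
      rw [pvStep, if_neg (by decide)]
      simp
  | append_singleton ys a ih =>
    intro fuel hf
    simp only [List.length_append, List.length_cons, List.length_nil] at hf
    obtain ⟨f, rfl⟩ : ∃ f, fuel = f + 1 := ⟨fuel - 1, by omega⟩
    have hidx : (((ys ++ [a]).length : Nat) : Int) - 1 = ((ys.length : Nat) : Int) := by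
      simp
    rw [pvStep, hidx]
    have hget : PySem.List.pyGet? (ys ++ [a]) ((ys.length : Nat) : Int) = some a := by
      rw [PySem.List.pyGet?_natCast, List.getElem?_concat_length]
    rw [hget]
    have hrev : (ys ++ [a]).reverse = a :: ys.reverse := by simp
    cases hpa : pvIsPunc a with
    | true =>
      have hg : (decide (0 ≤ ((ys.length : Nat) : Int)) && (some a).any pvIsPunc) = true := by
        rw [Option.any_some, hpa, Bool.and_true]; exact decide_eq_true (Int.natCast_nonneg _)
      rw [if_pos hg, pvLoopA_append ys a f _ (by omega), ih f (by omega), hrev,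
          List.takeWhile_cons, if_pos hpa]
      simp only [List.length_cons]
      push_cast
      ring
    | false =>
      have hg : ¬ ((decide (0 ≤ ((ys.length : Nat) : Int)) && (some a).any pvIsPunc) = true) := by
        rw [Option.any_some, hpa, Bool.and_false]; exact Bool.false_ne_true
      rw [if_neg hg, hrev, List.takeWhile_cons, if_neg (by rw [hpa]; exact Bool.false_ne_true)]
      simp only [List.length_nil]
      push_cast
      ring

-- ===== VERDICT (by name: the statement is the Claim_ definition above) =====
theorem get_suffix_punc_spec : Claim_equal_get_suffix_punc := by
  intro word _
  unfold Spec_get_suffix_punc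
  simp only [get_suffix_punc, get_suffix_punc_alt]
  generalize word.toList = cs
  set n := cs.length with hn
  set t := (cs.reverse.takeWhile pvIsPunc).length with ht
  have htn : t ≤ n := by
    rw [ht, hn, ← List.length_reverse (as := cs)]
    exact (List.takeWhile_prefix _).length_le
  have hloop : pvLoopA cs n ((n : Int) - 1) = (n : Int) - 1 - (t : Int) :=
    pvLoopA_main cs n le_rfl
  have htake : cs.reverse.takeWhile pvIsPunc = cs.reverse.take t := by
    rw [ht]
    exact List.prefix_iff_eq_take.mp (List.takeWhile_prefix _)
  have hrevlen : cs.reverse.length = n := by rw [List.length_reverse, hn]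
  have hdroprev : (cs.reverse.drop t).reverse = cs.take (n - t) := by
    rw [List.reverse_drop, hrevlen, List.reverse_reverse]
  have htakerev : ∀ k : Nat, (cs.reverse.take k).reverse = cs.drop (n - k) := by
    intro k
    rw [List.reverse_take, hrevlen, List.reverse_reverse]
  have hidx1 : (n : Int) - 1 - (t : Int) + 1 = ((n - t : Nat) : Int) := by omega
  have htrim : PySem.List.slice cs none (some ((n : Int) - 1 - (t : Int) + 1))
      = cs.take (n - t) := by
    rw [hidx1, PySem.List.slice_to cs (Int.natCast_nonneg _), Int.toNat_natCast]
  have hcond : PySem.Chars.endswith (cs.take (n - t)) ['\'', 's']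
      = PySem.Chars.startswith (cs.reverse.drop t) ['s', '\''] := by
    rw [Bool.eq_iff_iff, PySem.Chars.endswith_iff, PySem.Chars.startswith_iff, ← hdroprev,
        show (['\'', 's'] : List Char) = (['s', '\''] : List Char).reverse from rfl,
        List.reverse_suffix]
  rw [hloop, htrim, hcond]
  cases hc : PySem.Chars.startswith (cs.reverse.drop t) ['s', '\''] with
  | false =>
    rw [if_neg Bool.false_ne_true, if_neg Bool.false_ne_true, hidx1,
        PySem.List.slice_from cs (Int.natCast_nonneg _), Int.toNat_natCast, htake, htakerev]
  | true =>
    have hpre : (['s', '\''] : List Char) <+: cs.reverse.drop t :=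
      (PySem.Chars.startswith_iff _ _).mp hc
    obtain ⟨r, hr⟩ := hpre
    have h2 : t + 2 ≤ n := by
      have := congrArg List.length hr
      simp only [List.length_append, List.length_cons, List.length_nil, List.length_drop,
        hrevlen] at this
      omega
    rw [if_pos rfl, if_pos rfl]
    have hidx2 : (n : Int) - 1 - (t : Int) - 2 + 1 = ((n - (t + 2) : Nat) : Int) := by omega
    rw [hidx2, PySem.List.slice_from cs (Int.natCast_nonneg _), Int.toNat_natCast]
    have htk2 : cs.reverse.take (t + 2) = cs.reverse.takeWhile pvIsPunc ++ ['s', '\''] := by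
      have hlt : (cs.reverse.take t).length = t := by
        rw [List.length_take, hrevlen]; omega
      conv_lhs => rw [← List.take_append_drop t cs.reverse, ← hr]
      rw [show cs.reverse.take t ++ (['s', '\''] ++ r)
            = (cs.reverse.take t ++ ['s', '\'']) ++ r from by simp,
          List.take_append_of_le_length (by rw [List.length_append, hlt]; simp),
          List.take_of_length_le (by rw [List.length_append, hlt]; simp), htake]
    rw [← htk2, htakerev]
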